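-- pv_equiv track=rewrite | github.com/elekto-io/elekto | elekto/core/__init__.py | schulze_p
-- ===== SOURCE A (Python) =====
-- def schulze_p(candidates, d):
--     p = {}
--     for X in candidates:
--         for Y in candidates:
--             if X != Y:
--                 strength = d.get((X, Y), 0)
--                 p[X, Y] = strength if strength > d.get((Y, X), 0) else 0
--
--     for X in candidates:
--         for Z in candidates:
--             if X != Z:
--                 for Y in candidates:
--                     if X != Y and Z != Y:
--                         p[Z, Y] = max(p.get((Z, Y), 0), min(
--                             p.get((Z, X), 0), p.get((X, Y), 0)))
--
--     return p
-- ===== SOURCE B (Python) =====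
-- def schulze_p(candidates, d):
--     # Per-source Bellman-Ford-style fixpoint iteration of the widest-path
--     # (bottleneck) recurrence, instead of A's in-place all-pairs Floyd-Warshall.
--     cands = list(dict.fromkeys(candidates))
--     w = {}
--     for X in cands:
--         for Y in cands:
--             if X != Y:
--                 s = d.get((X, Y), 0)
--                 w[X, Y] = s if s > d.get((Y, X), 0) else 0
--     p = {}
--     for Z in cands:
--         row = {Y: w[Z, Y] for Y in cands if Y != Z}
--         for _ in range(len(cands)):
--             new = {Y: max(row[Y],
--                           max([min(row[X], w[X, Y])
--                                for X in cands if X != Z and X != Y],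
--                               default=row[Y]))
--                    for Y in cands if Y != Z}
--             if new == row:
--                 break
--             row = new
--         for Y in cands:
--             if Y != Z:
--                 p[Z, Y] = row[Y]
--     return p
-- ===== Notes on version B (the rewrite author's own statement) =====
-- stated objective: faster
-- what changed: Replaces A's in-place all-pairs Floyd-Warshall triple loop by a per-source Bellman-Ford-style fixpoint iteration: for each source the widest-path (bottleneck) row is relaxed round by round against the static edge weights and stops as soon as a round changes nothing.
import Mathlib
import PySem

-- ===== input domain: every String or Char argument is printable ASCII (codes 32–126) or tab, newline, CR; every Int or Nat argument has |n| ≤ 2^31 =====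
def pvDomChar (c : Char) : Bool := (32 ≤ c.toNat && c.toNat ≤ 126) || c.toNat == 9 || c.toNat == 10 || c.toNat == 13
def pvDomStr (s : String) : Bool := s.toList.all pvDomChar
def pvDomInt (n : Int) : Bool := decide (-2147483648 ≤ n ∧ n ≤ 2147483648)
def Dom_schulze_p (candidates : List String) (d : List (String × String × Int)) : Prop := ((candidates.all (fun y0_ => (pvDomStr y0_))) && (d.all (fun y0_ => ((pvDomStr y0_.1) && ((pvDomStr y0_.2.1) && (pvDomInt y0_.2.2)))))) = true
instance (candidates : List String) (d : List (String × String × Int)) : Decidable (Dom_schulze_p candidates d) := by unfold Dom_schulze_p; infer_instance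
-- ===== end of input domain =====

-- B replaces A's in-place all-pairs Floyd–Warshall by a per-source Bellman–Ford-style
-- fixpoint iteration of the widest-path (bottleneck) recurrence that stops once a round
-- changes nothing (measured faster on a timing run's random inputs; same return
-- value, including dict key order).

-- ===== PORT A =====
-- the Python dict argument d (keys are pairs (X, Y)) arrives flattened as triples;
-- `tget d k` is Python's `d.get(k, 0)` (first match) on that flattened association list
def tget (d : List (String × String × Int)) (k : String × String) : Int :=
  match d.find? (fun t => t.1 == k.1 && t.2.1 == k.2) with
  | some t => t.2.2
  | none => 0

def schulze_p (candidates : List String) (d : List (String × String × Int)) : List (String × String × Int) :=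
  let p : PySem.Dict (String × String) Int :=
    candidates.foldl (fun p X =>
      candidates.foldl (fun p Y =>
        if X ≠ Y then
          let strength := tget d (X, Y)
          p.insert (X, Y) (if strength > tget d (Y, X) then strength else 0)
        else p) p) PySem.Dict.empty
  let p2 : PySem.Dict (String × String) Int :=
    candidates.foldl (fun p X =>
      candidates.foldl (fun p Z =>
        if X ≠ Z then
          candidates.foldl (fun p Y =>
            if X ≠ Y ∧ Z ≠ Y then
              p.insert (Z, Y) (max (p.getD (Z, Y) 0) (min (p.getD (Z, X) 0) (p.getD (X, Y) 0)))
            else p) p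
        else p) p) p
  p2.items.map (fun kv => (kv.1.1, kv.1.2, kv.2))

-- ===== PORT B =====
-- one relaxation round of B's per-source fixpoint iteration (the dict comprehension in Source B)
def altRound (cands : List String) (w : PySem.Dict (String × String) Int) (Z : String)
    (row : PySem.Dict String Int) : PySem.Dict String Int :=
  PySem.Dict.ofList ((cands.filter (fun Y => decide (Y ≠ Z))).map (fun Y =>
    (Y, max (row.getD Y 0)
          (PySem.List.maxD
            ((cands.filter (fun X => decide (X ≠ Z) && decide (X ≠ Y))).map
              (fun X => min (row.getD X 0) (w.getD (X, Y) 0)))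
            (fun v => v) (row.getD Y 0)))))

-- the bounded `for _ in range(len(cands))` loop with its `if new == row: break`
def altLoop (cands : List String) (w : PySem.Dict (String × String) Int) (Z : String) :
    Nat → PySem.Dict String Int → PySem.Dict String Int
  | 0, row => row
  | n + 1, row =>
      let nw := altRound cands w Z row
      if nw = row then row else altLoop cands w Z n nw

def schulze_p_alt (candidates : List String) (d : List (String × String × Int)) : List (String × String × Int) :=
  let cands := PySem.List.dedup candidates
  let w : PySem.Dict (String × String) Int :=
    cands.foldl (fun w X =>
      cands.foldl (fun w Y =>
        if X ≠ Y then
          let s := tget d (X, Y)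
          w.insert (X, Y) (if s > tget d (Y, X) then s else 0)
        else w) w) PySem.Dict.empty
  let p : PySem.Dict (String × String) Int :=
    cands.foldl (fun p Z =>
      -- row[Y] and w[X, Y] below are Python's raw indexing; the keys are always present, so getD _ 0 is exact
      let row0 : PySem.Dict String Int :=
        PySem.Dict.ofList ((cands.filter (fun Y => decide (Y ≠ Z))).map (fun Y => (Y, w.getD (Z, Y) 0)))
      let row := altLoop cands w Z cands.length row0
      cands.foldl (fun p Y => if Y ≠ Z then p.insert (Z, Y) (row.getD Y 0) else p) p)
      PySem.Dict.empty
  p.items.map (fun kv => (kv.1.1, kv.1.2, kv.2))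

-- ===== PRECONDITION & SPEC =====
def Spec_schulze_p (candidates : List String) (d : List (String × String × Int)) (out : List (String × String × Int)) : Prop := out = schulze_p_alt candidates d
instance (candidates : List String) (d : List (String × String × Int)) (out : List (String × String × Int)) : Decidable (Spec_schulze_p candidates d out) := by unfold Spec_schulze_p; infer_instance

-- ===== CLAIM (what is proved, stated in full; the proofs are below) =====
def Claim_equal_schulze_p : Prop := ∀ (candidates : List String) (d : List (String × String × Int)), Dom_schulze_p candidates d → Spec_schulze_p candidates d (schulze_p candidates d)

-- ===== LEMMAS AND PROOFS =====

-- ---------- proof-side definitions ----------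

-- the phase-1 edge weight w[X,Y] as a pure function of the key
def wvalF (d : List (String × String × Int)) (k : String × String) : Int :=
  if tget d (k.2, k.1) < tget d k then tget d k else 0

-- the key list of the result dict: ordered pairs of distinct candidates in first-occurrence order
def pairKeysFrom (pre c : List String) : List (String × String) :=
  (PySem.Set.ofList pre).flatMap (fun X =>
    ((PySem.Set.ofList c).filter (fun Y => decide (X ≠ Y))).map (fun Y => (X, Y)))

def pairKeys (c : List String) : List (String × String) := pairKeysFrom c c

-- one whole Floyd-Warshall round of A (intermediate X), as a pure function update
def stepF (c : List String) (g : String × String → Int) (X : String) : String × String → Int :=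
  fun k => if k.1 ∈ c ∧ X ≠ k.1 ∧ k.2 ∈ c ∧ X ≠ k.2 ∧ k.1 ≠ k.2
    then max (g k) (min (g (k.1, X)) (g (X, k.2))) else g k

def gFW (c : List String) (d : List (String × String × Int)) : String × String → Int :=
  c.foldl (stepF c) (wvalF d)

-- bottleneck value of a walk Z -> vs -> Y
def wvF (d : List (String × String × Int)) : String → List String → String → Int
  | Z, [], Y => wvalF d (Z, Y)
  | Z, v :: vs, Y => min (wvalF d (Z, v)) (wvF d v vs Y)

-- one relaxation round of B, as a pure function update
def jstepF (c : List String) (d : List (String × String × Int)) (Z : String)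
    (h : String → Int) : String → Int :=
  fun Y => max (h Y)
    (PySem.List.maxD
      ((c.filter (fun X => decide (X ≠ Z) && decide (X ≠ Y))).map
        (fun X => min (h X) (wvalF d (X, Y))))
      (fun v => v) (h Y))

def jiterF (c : List String) (d : List (String × String × Int)) (Z : String) :
    Nat → (String → Int) → (String → Int)
  | 0, h => h
  | n + 1, h => jiterF c d Z n (jstepF c d Z h)

-- ---------- generic dict-shape lemmas ----------

theorem mapform_keys {κ ν : Type} [BEq κ] {K : List κ} {g : κ → ν} {p : PySem.Dict κ ν}
    (hp : p.items = K.map (fun k => (k, g k))) : p.keys = K := by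
  simp [PySem.Dict.keys, hp, List.map_map, Function.comp_def]

theorem mapform_getD {κ ν : Type} [BEq κ] [LawfulBEq κ] {K : List κ} {g : κ → ν}
    {p : PySem.Dict κ ν} (hp : p.items = K.map (fun k => (k, g k))) (hnd : K.Nodup)
    {k : κ} (hk : k ∈ K) (v0 : ν) : p.getD k v0 = g k := by
  have hmem : (k, g k) ∈ p.items := by
    rw [hp]; exact List.mem_map.mpr ⟨k, hk, rfl⟩
  have hkeys : p.keys.Nodup := by rw [mapform_keys hp]; exact hnd
  exact PySem.Dict.getD_of_mem_items p hmem hkeys v0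

theorem mapform_contains_false {κ ν : Type} [BEq κ] [LawfulBEq κ] {K : List κ} {g : κ → ν}
    {p : PySem.Dict κ ν} (hp : p.items = K.map (fun k => (k, g k)))
    {k : κ} (hk : k ∉ K) : p.contains k = false := by
  have hkeys : p.keys = K := mapform_keys hp
  by_contra hne
  have : p.contains k = true := by
    cases hcc : p.contains k
    · exact absurd hcc hne
    · rfl
  exact hk (hkeys ▸ (PySem.Dict.contains_iff_mem_keys p k).mp this)

theorem mapform_insert {κ ν : Type} [BEq κ] [LawfulBEq κ] [DecidableEq κ] {K : List κ} {g : κ → ν}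
    {p : PySem.Dict κ ν} (hp : p.items = K.map (fun k => (k, g k)))
    {k0 : κ} (hk : k0 ∈ K) (v : ν) :
    (p.insert k0 v).items = K.map (fun k => (k, if k = k0 then v else g k)) := by
  have hc : p.contains k0 = true := by
    rw [PySem.Dict.contains_iff_mem_keys, mapform_keys hp]; exact hk
  rw [PySem.Dict.items_insert_of_contains p v hc, hp, List.map_map]
  refine List.map_congr_left (fun a ha => ?_)
  by_cases hak : a = k0
  · subst hak; simp
  · simp [Function.comp, hak, show ¬((a == k0) = true) from by simpa using hak]

theorem map_pair_inj {κ ν : Type} (K : List κ) (f g : κ → ν)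
    (h : K.map (fun k => (k, f k)) = K.map (fun k => (k, g k))) : ∀ k ∈ K, f k = g k := by
  induction K with
  | nil => intro k hk; cases hk
  | cons a K ih =>
      simp only [List.map_cons, List.cons.injEq] at h
      intro k hk
      rcases List.mem_cons.mp hk with hk' | hk'
      · subst hk'; exact congrArg Prod.snd h.1
      · exact ih h.2 k hk' 

-- items of Dict.ofList when the keys are distinct
theorem items_ofList_nodup {κ ν : Type} [BEq κ] [LawfulBEq κ] (l : List (κ × ν))
    (h : (l.map Prod.fst).Nodup) : (PySem.Dict.ofList l).items = l := by
  have : ∀ (pz : PySem.Dict κ ν), (∀ a ∈ l, pz.contains a.1 = false) →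
      (l.foldl (fun d a => d.insert a.1 a.2) pz).items = pz.items ++ l := by
    intro pz hfresh
    have := PySem.Dict.items_foldl_insert_fresh l Prod.fst Prod.snd pz hfresh h
    simpa using this
  have h2 := this PySem.Dict.empty (fun a _ => PySem.Dict.contains_empty a.1)
  simpa [PySem.Dict.ofList, PySem.Dict.update] using h2

-- ---------- set-shape lemmas ----------

theorem set_ofList_map_inj {α β : Type} [BEq α] [LawfulBEq α] [BEq β] [LawfulBEq β]
    {f : α → β} (hf : Function.Injective f) (l : List α) :
    PySem.Set.ofList (l.map f) = (PySem.Set.ofList l).map f := by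
  induction l using List.reverseRecOn with
  | nil => rfl
  | append_singleton l a ih =>
      rw [List.map_append, List.map_singleton, PySem.Set.ofList_append_singleton,
        PySem.Set.ofList_append_singleton, ih]
      by_cases ha : a ∈ PySem.Set.ofList l
      · rw [PySem.Set.add_of_mem ha, PySem.Set.add_of_mem]
        exact List.mem_map.mpr ⟨a, ha, rfl⟩
      · rw [PySem.Set.add_of_not_mem ha, PySem.Set.add_of_not_mem, List.map_append,
          List.map_singleton]
        intro hmem
        rcases List.mem_map.mp hmem with ⟨b, hb, hfb⟩
        exact ha (hf hfb ▸ hb)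

theorem set_ofList_filter {α : Type} [BEq α] [LawfulBEq α] (q : α → Bool) (l : List α) :
    PySem.Set.ofList (l.filter q) = (PySem.Set.ofList l).filter q := by
  induction l using List.reverseRecOn with
  | nil => rfl
  | append_singleton l a ih =>
      rw [PySem.Set.ofList_append_singleton]
      by_cases hq : q a = true
      · have h1 : List.filter q (l ++ [a]) = List.filter q l ++ [a] := by simp [hq]
        rw [h1, PySem.Set.ofList_append_singleton, ih]
        by_cases ha : a ∈ PySem.Set.ofList l
        · rw [PySem.Set.add_of_mem ha, PySem.Set.add_of_mem (List.mem_filter.mpr ⟨ha, hq⟩)]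
        · rw [PySem.Set.add_of_not_mem ha, PySem.Set.add_of_not_mem
            (fun hmem => ha (List.mem_filter.mp hmem).1), List.filter_append]
          simp [hq]
      · have h1 : List.filter q (l ++ [a]) = List.filter q l := by simp [hq]
        rw [h1, ih]
        by_cases ha : a ∈ PySem.Set.ofList l
        · rw [PySem.Set.add_of_mem ha]
        · rw [PySem.Set.add_of_not_mem ha, List.filter_append]
          simp [hq]

theorem set_update_subset {α : Type} [BEq α] [LawfulBEq α] {s : PySem.Set α} {l : List α}
    (h : ∀ a ∈ l, a ∈ s) : PySem.Set.update s l = s := by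
  induction l generalizing s with
  | nil => rfl
  | cons a l ih =>
      rw [PySem.Set.update_cons, PySem.Set.add_of_mem (h a (List.mem_cons_self))]
      exact ih (fun b hb => h b (List.mem_cons_of_mem a hb))

theorem set_update_fresh {α : Type} [BEq α] [LawfulBEq α] {s : PySem.Set α} {l : List α}
    (h : ∀ a ∈ l, a ∉ s) : PySem.Set.update s l = s ++ PySem.Set.ofList l := by
  induction l using List.reverseRecOn generalizing s with
  | nil => simp [PySem.Set.update]
  | append_singleton l a ih =>
      have h1 : ∀ b ∈ l, b ∉ s := fun b hb => h b (List.mem_append_left _ hb)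
      have ha : a ∉ s := h a (List.mem_append_right _ List.mem_cons_self)
      rw [show PySem.Set.update s (l ++ [a]) = (PySem.Set.update s l).add a from by
            simp [PySem.Set.update, List.foldl_append],
        ih h1, PySem.Set.ofList_append_singleton]
      by_cases hmem : a ∈ PySem.Set.ofList l
      · rw [PySem.Set.add_of_mem (by exact List.mem_append_right _ hmem),
          PySem.Set.add_of_mem hmem]
      · rw [PySem.Set.add_of_not_mem (by
            intro hc
            rcases List.mem_append.mp hc with hc | hc
            · exact ha hc
            · exact hmem hc),
          PySem.Set.add_of_not_mem hmem, List.append_assoc]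

-- ---------- key-list lemmas ----------

theorem mem_pairKeysFrom {pre c : List String} {a b : String} :
    (a, b) ∈ pairKeysFrom pre c ↔ a ∈ pre ∧ b ∈ c ∧ a ≠ b := by
  unfold pairKeysFrom
  simp only [List.mem_flatMap, List.mem_map, List.mem_filter, PySem.Set.mem_ofList]
  constructor
  · rintro ⟨X, hX, Y, ⟨⟨hY, hne⟩, hEq⟩⟩
    cases hEq
    exact ⟨hX, hY, by simpa using hne⟩
  · rintro ⟨ha, hb, hne⟩
    exact ⟨a, ha, b, ⟨⟨hb, by simpa using hne⟩, rfl⟩⟩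

theorem nodup_pairKeysFrom (pre c : List String) : (pairKeysFrom pre c).Nodup := by
  unfold pairKeysFrom
  have hnd : (PySem.Set.ofList pre).Nodup := PySem.Set.nodup_ofList pre
  generalize (PySem.Set.ofList pre) = u at hnd
  induction u with
  | nil => simp
  | cons x u ih =>
      rw [List.flatMap_cons]
      apply List.Nodup.append
      · exact List.Nodup.map (fun a b hab => by simpa using congrArg Prod.snd hab)
          (List.Nodup.filter _ (PySem.Set.nodup_ofList c))
      · exact ih hnd.of_cons
      · intro k hk1 hk2
        rcases List.mem_map.mp hk1 with ⟨Y, _, rfl⟩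
        rcases List.mem_flatMap.mp hk2 with ⟨X, hX, hk2'⟩
        rcases List.mem_map.mp hk2' with ⟨Y', _, hEq⟩
        have : X = x := by simpa using (congrArg Prod.fst hEq.symm).symm
        exact (List.nodup_cons.mp hnd).1 (this ▸ hX)

theorem pairKeysFrom_snoc_mem {pre : List String} (c : List String) {X : String} (hX : X ∈ pre) :
    pairKeysFrom (pre ++ [X]) c = pairKeysFrom pre c := by
  unfold pairKeysFrom
  rw [PySem.Set.ofList_append_singleton,
    PySem.Set.add_of_mem (show X ∈ PySem.Set.ofList pre by simpa [PySem.Set.mem_ofList] using hX)]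

theorem pairKeysFrom_snoc_new {pre : List String} (c : List String) {X : String} (hX : X ∉ pre) :
    pairKeysFrom (pre ++ [X]) c
      = pairKeysFrom pre c
        ++ ((PySem.Set.ofList c).filter (fun Y => decide (X ≠ Y))).map (fun Y => (X, Y)) := by
  unfold pairKeysFrom
  rw [PySem.Set.ofList_append_singleton,
    PySem.Set.add_of_not_mem (fun hc => hX (by simpa [PySem.Set.mem_ofList] using hc)),
    List.flatMap_append]
  simp

theorem pairKeys_dedup (c : List String) : pairKeys (PySem.List.dedup c) = pairKeys c := by
  unfold pairKeys pairKeysFrom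
  rw [PySem.List.dedup_eq_ofList, PySem.Set.ofList_ofList]

-- ---------- phase 1 (edge weights), shared by both ports ----------

theorem phase1_inner (d : List (String × String × Int)) (X : String) (ys : List String) :
    ∀ (K : List (String × String)) (p : PySem.Dict (String × String) Int), K.Nodup →
    p.items = K.map (fun k => (k, wvalF d k)) →
    (ys.foldl (fun p Y => if X ≠ Y then p.insert (X, Y) (wvalF d (X, Y)) else p) p).items
      = (PySem.Set.update K ((ys.filter (fun Y => decide (X ≠ Y))).map (fun Y => (X, Y)))).map
          (fun k => (k, wvalF d k)) := by
  intro K p hnd hp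
  induction ys using List.reverseRecOn with
  | nil => simpa [PySem.Set.update] using hp
  | append_singleton ys Y ih =>
      rw [List.foldl_append, List.foldl_cons, List.foldl_nil]
      by_cases hXY : X ≠ Y
      · have hfilter : (ys ++ [Y]).filter (fun Y => decide (X ≠ Y))
            = ys.filter (fun Y => decide (X ≠ Y)) ++ [Y] := by simp [hXY]
        have hupd : PySem.Set.update K
              (((ys ++ [Y]).filter (fun Y => decide (X ≠ Y))).map (fun Y => (X, Y)))
            = (PySem.Set.update K
                ((ys.filter (fun Y => decide (X ≠ Y))).map (fun Y => (X, Y)))).add (X, Y) := by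
          rw [hfilter, List.map_append, List.map_singleton, PySem.Set.update,
            List.foldl_append]
          rfl
        have hnd2 : (PySem.Set.update K
            ((ys.filter (fun Y => decide (X ≠ Y))).map (fun Y => (X, Y)))).Nodup :=
          PySem.Set.nodup_update _ _ hnd
        rw [if_pos hXY, hupd]
        by_cases hmem : (X, Y) ∈ PySem.Set.update K
            ((ys.filter (fun Y => decide (X ≠ Y))).map (fun Y => (X, Y)))
        · rw [PySem.Set.add_of_mem hmem, mapform_insert ih hmem _]
          exact List.map_congr_left (fun a _ => by by_cases ha : a = (X, Y) <;> simp [ha])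
        · rw [PySem.Set.add_of_not_mem hmem,
            PySem.Dict.items_insert_of_not_contains _ _ (mapform_contains_false ih hmem),
            ih, List.map_append, List.map_singleton]
      · have hfilter : (ys ++ [Y]).filter (fun Y => decide (X ≠ Y))
            = ys.filter (fun Y => decide (X ≠ Y)) := by simp [hXY]
        rw [if_neg hXY, hfilter, ih]

theorem phase1_items (c : List String) (d : List (String × String × Int)) :
    (c.foldl (fun p X =>
        c.foldl (fun p Y => if X ≠ Y then p.insert (X, Y) (wvalF d (X, Y)) else p) p)
      PySem.Dict.empty).items
      = (pairKeys c).map (fun k => (k, wvalF d k)) := by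
  have go : ∀ (rest pre : List String) (p : PySem.Dict (String × String) Int),
      p.items = (pairKeysFrom pre c).map (fun k => (k, wvalF d k)) →
      (rest.foldl (fun p X =>
          c.foldl (fun p Y => if X ≠ Y then p.insert (X, Y) (wvalF d (X, Y)) else p) p) p).items
        = (pairKeysFrom (pre ++ rest) c).map (fun k => (k, wvalF d k)) := by
    intro rest
    induction rest with
    | nil => intro pre p hp; simpa using hp
    | cons X rest ih =>
        intro pre p hp
        rw [List.foldl_cons]
        have hinner := phase1_inner d X c (pairKeysFrom pre c) p (nodup_pairKeysFrom pre c) hp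
        have hkey : PySem.Set.update (pairKeysFrom pre c)
              ((c.filter (fun Y => decide (X ≠ Y))).map (fun Y => (X, Y)))
            = pairKeysFrom (pre ++ [X]) c := by
          by_cases hX : X ∈ pre
          · rw [pairKeysFrom_snoc_mem c hX]
            apply set_update_subset
            intro a ha
            rcases List.mem_map.mp ha with ⟨Y, hY, rfl⟩
            rcases List.mem_filter.mp hY with ⟨hYc, hq⟩
            exact mem_pairKeysFrom.mpr ⟨hX, hYc, by simpa using hq⟩
          · rw [pairKeysFrom_snoc_new c hX, set_update_fresh ?fresh]
            case fresh =>
              intro a ha hmem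
              rcases List.mem_map.mp ha with ⟨Y, hY, rfl⟩
              exact hX (mem_pairKeysFrom.mp hmem).1
            rw [set_ofList_map_inj (fun x y hxy => by simpa using congrArg Prod.snd hxy),
              set_ofList_filter]
        have step : (c.foldl (fun p Y => if X ≠ Y then p.insert (X, Y) (wvalF d (X, Y)) else p)
              p).items = (pairKeysFrom (pre ++ [X]) c).map (fun k => (k, wvalF d k)) := by
          rw [hinner, hkey]
        have := ih (pre ++ [X]) _ step
        simpa [List.append_assoc] using this
  have h0 : (PySem.Dict.empty : PySem.Dict (String × String) Int).items
      = (pairKeysFrom [] c).map (fun k => (k, wvalF d k)) := by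
    simp [pairKeysFrom]
    rfl
  simpa using go c [] PySem.Dict.empty h0

-- ---------- phase 2 of A (Floyd-Warshall rounds) ----------

theorem phase2_inner (c : List String) (X Z : String) (hXc : X ∈ c) (hXZ : X ≠ Z)
    (hZ : Z ∈ c) (ys : List String) (hys : ∀ y ∈ ys, y ∈ c)
    (h : String × String → Int) (p : PySem.Dict (String × String) Int)
    (hp : p.items = (pairKeys c).map (fun k => (k, h k))) :
    (ys.foldl (fun p Y =>
        if X ≠ Y ∧ Z ≠ Y then
          p.insert (Z, Y) (max (p.getD (Z, Y) 0) (min (p.getD (Z, X) 0) (p.getD (X, Y) 0)))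
        else p) p).items
      = (pairKeys c).map (fun k =>
          (k, if k.1 = Z ∧ k.2 ∈ ys ∧ X ≠ k.2 ∧ Z ≠ k.2
              then max (h k) (min (h (Z, X)) (h (X, k.2))) else h k)) := by
  have hndK : (pairKeys c).Nodup := nodup_pairKeysFrom c c
  revert hys
  induction ys using List.reverseRecOn with
  | nil =>
      intro hys
      rw [List.foldl_nil, hp]
      exact List.map_congr_left (fun a _ => by simp)
  | append_singleton ys Y ih =>
      intro hys
      have hysc : ∀ y ∈ ys, y ∈ c := fun y hy => hys y (List.mem_append_left _ hy)
      have hYc : Y ∈ c := hys Y (List.mem_append_right _ List.mem_cons_self)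
      have ih' := ih hysc
      rw [List.foldl_append, List.foldl_cons, List.foldl_nil]
      by_cases hg : X ≠ Y ∧ Z ≠ Y
      · have hZY : (Z, Y) ∈ pairKeys c := mem_pairKeysFrom.mpr ⟨hZ, hYc, hg.2⟩
        have hZX : (Z, X) ∈ pairKeys c := mem_pairKeysFrom.mpr ⟨hZ, hXc, fun he => hXZ he.symm⟩
        have hXY : (X, Y) ∈ pairKeys c := mem_pairKeysFrom.mpr ⟨hXc, hYc, hg.1⟩
        have hvZX : (ys.foldl (fun p Y =>
              if X ≠ Y ∧ Z ≠ Y then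
                p.insert (Z, Y) (max (p.getD (Z, Y) 0) (min (p.getD (Z, X) 0) (p.getD (X, Y) 0)))
              else p) p).getD (Z, X) 0 = h (Z, X) := by
          rw [mapform_getD ih' hndK hZX]
          exact if_neg (fun hc => hc.2.2.1 rfl)
        have hvXY : (ys.foldl (fun p Y =>
              if X ≠ Y ∧ Z ≠ Y then
                p.insert (Z, Y) (max (p.getD (Z, Y) 0) (min (p.getD (Z, X) 0) (p.getD (X, Y) 0)))
              else p) p).getD (X, Y) 0 = h (X, Y) := by
          rw [mapform_getD ih' hndK hXY]
          exact if_neg (fun hc => hXZ hc.1)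
        have hvZY : (ys.foldl (fun p Y =>
              if X ≠ Y ∧ Z ≠ Y then
                p.insert (Z, Y) (max (p.getD (Z, Y) 0) (min (p.getD (Z, X) 0) (p.getD (X, Y) 0)))
              else p) p).getD (Z, Y) 0
            = (if Y ∈ ys then max (h (Z, Y)) (min (h (Z, X)) (h (X, Y))) else h (Z, Y)) := by
          rw [mapform_getD ih' hndK hZY]
          by_cases hm : Y ∈ ys
          · rw [if_pos hm, if_pos (show (Z, Y).1 = Z ∧ (Z, Y).2 ∈ ys ∧ X ≠ (Z, Y).2 ∧
                Z ≠ (Z, Y).2 from ⟨rfl, hm, hg.1, hg.2⟩)]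
          · rw [if_neg hm, if_neg (fun hc => hm hc.2.1)]
        rw [if_pos hg, hvZY, hvZX, hvXY, mapform_insert ih' hZY _]
        refine List.map_congr_left (fun a haK => ?_)
        obtain ⟨a1, a2⟩ := a
        by_cases ha : (a1, a2) = (Z, Y)
        · rw [if_pos ha]
          injection ha with ha1 ha2
          subst ha1; subst ha2
          refine congrArg (fun v => ((a1, a2), v)) ?_
          rw [if_pos (show a1 = a1 ∧ a2 ∈ ys ++ [a2] ∧ X ≠ a2 ∧ a1 ≠ a2 from
            ⟨rfl, List.mem_append_right _ List.mem_cons_self, hg.1, hg.2⟩)]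
          by_cases hm : a2 ∈ ys
          · rw [if_pos hm, max_assoc, max_self]
          · rw [if_neg hm]
        · rw [if_neg ha]
          refine congrArg (fun v => ((a1, a2), v)) ?_
          by_cases h1 : a1 = Z
          · by_cases h2 : a2 = Y
            · exact absurd (by rw [h1, h2]) ha
            · have hmm : (a2 ∈ ys ++ [Y]) ↔ (a2 ∈ ys) := by simp [List.mem_append, h2]
              by_cases hm : a2 ∈ ys
              · by_cases hX2 : X ≠ a2 ∧ Z ≠ a2
                · rw [if_pos ⟨h1, hm, hX2.1, hX2.2⟩, if_pos ⟨h1, hmm.mpr hm, hX2.1, hX2.2⟩]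
                · rw [if_neg (fun hc => hX2 ⟨hc.2.2.1, hc.2.2.2⟩),
                    if_neg (fun hc => hX2 ⟨hc.2.2.1, hc.2.2.2⟩)]
              · rw [if_neg (fun hc => hm hc.2.1), if_neg (fun hc => hm (hmm.mp hc.2.1))]
          · rw [if_neg (fun hc => h1 hc.1), if_neg (fun hc => h1 hc.1)]
      · rw [if_neg hg, ih']
        refine List.map_congr_left (fun a _ => ?_)
        obtain ⟨a1, a2⟩ := a
        refine congrArg (fun v => ((a1, a2), v)) ?_
        by_cases h2 : a2 = Y
        · subst h2
          have hng : ¬(X ≠ a2 ∧ Z ≠ a2) := hg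
          rw [if_neg (fun hc => hng ⟨hc.2.2.1, hc.2.2.2⟩),
            if_neg (fun hc => hng ⟨hc.2.2.1, hc.2.2.2⟩)]
        · have hmm : (a2 ∈ ys ++ [Y]) ↔ (a2 ∈ ys) := by simp [List.mem_append, h2]
          by_cases h1 : a1 = Z
          · by_cases hm : a2 ∈ ys
            · by_cases hX2 : X ≠ a2 ∧ Z ≠ a2
              · rw [if_pos ⟨h1, hm, hX2.1, hX2.2⟩, if_pos ⟨h1, hmm.mpr hm, hX2.1, hX2.2⟩]
              · rw [if_neg (fun hc => hX2 ⟨hc.2.2.1, hc.2.2.2⟩),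
                  if_neg (fun hc => hX2 ⟨hc.2.2.1, hc.2.2.2⟩)]
            · rw [if_neg (fun hc => hm hc.2.1), if_neg (fun hc => hm (hmm.mp hc.2.1))]
          · rw [if_neg (fun hc => h1 hc.1), if_neg (fun hc => h1 hc.1)]

theorem phase2_mid (c : List String) (X : String) (hXc : X ∈ c)
    (zs : List String) (hzs : ∀ z ∈ zs, z ∈ c)
    (h : String × String → Int) (p : PySem.Dict (String × String) Int)
    (hp : p.items = (pairKeys c).map (fun k => (k, h k))) :
    (zs.foldl (fun p Z =>
        if X ≠ Z then
          c.foldl (fun p Y =>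
            if X ≠ Y ∧ Z ≠ Y then
              p.insert (Z, Y) (max (p.getD (Z, Y) 0) (min (p.getD (Z, X) 0) (p.getD (X, Y) 0)))
            else p) p
        else p) p).items
      = (pairKeys c).map (fun k =>
          (k, if k.1 ∈ zs ∧ X ≠ k.1 ∧ k.2 ∈ c ∧ X ≠ k.2 ∧ k.1 ≠ k.2
              then max (h k) (min (h (k.1, X)) (h (X, k.2))) else h k)) := by
  revert hzs
  induction zs using List.reverseRecOn with
  | nil =>
      intro hzs
      rw [List.foldl_nil, hp]
      exact List.map_congr_left (fun a _ => by simp)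
  | append_singleton zs Z ih =>
      intro hzs
      have hzsc : ∀ z ∈ zs, z ∈ c := fun z hz => hzs z (List.mem_append_left _ hz)
      have hZc : Z ∈ c := hzs Z (List.mem_append_right _ List.mem_cons_self)
      have ih' := ih hzsc
      rw [List.foldl_append, List.foldl_cons, List.foldl_nil]
      by_cases hXZ : X ≠ Z
      · rw [if_pos hXZ,
          phase2_inner c X Z hXc hXZ hZc c (fun y hy => hy) _ _ ih']
        refine List.map_congr_left (fun a haK => ?_)
        obtain ⟨a1, a2⟩ := a
        obtain ⟨ha1, ha2, hane⟩ := mem_pairKeysFrom.mp haK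
        by_cases h1 : a1 = Z
        · subst h1
          by_cases hX2 : X = a2
          · simp [hX2]
          · by_cases hmem : a1 ∈ zs
            · simp [hmem, hXZ, ha2, hane, hX2]
            · simp [hmem, hXZ, ha2, hane, hX2]
        · by_cases hmem : a1 ∈ zs
          · simp [h1, hmem, ha2, hane]
          · simp [h1, hmem, ha2, hane]
      · rw [if_neg hXZ, ih']
        have hXZ' : X = Z := not_not.mp (fun hc => hXZ hc)
        subst hXZ'
        refine List.map_congr_left (fun a haK => ?_)
        obtain ⟨a1, a2⟩ := a
        by_cases h1 : a1 = X
        · simp [h1]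
        · simp [h1]

theorem phase2_items (c : List String) (xs : List String) (hxs : ∀ x ∈ xs, x ∈ c) :
    ∀ (h : String × String → Int) (p : PySem.Dict (String × String) Int),
    p.items = (pairKeys c).map (fun k => (k, h k)) →
    (xs.foldl (fun p X =>
        c.foldl (fun p Z =>
          if X ≠ Z then
            c.foldl (fun p Y =>
              if X ≠ Y ∧ Z ≠ Y then
                p.insert (Z, Y) (max (p.getD (Z, Y) 0) (min (p.getD (Z, X) 0) (p.getD (X, Y) 0)))
              else p) p
          else p) p) p).items
      = (pairKeys c).map (fun k => (k, xs.foldl (stepF c) h k)) := by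
  induction xs with
  | nil => intro h p hp; simpa using hp
  | cons X xs ih =>
      intro h p hp
      have hXc : X ∈ c := hxs X List.mem_cons_self
      have hxs' : ∀ x ∈ xs, x ∈ c := fun x hx => hxs x (List.mem_cons_of_mem X hx)
      rw [List.foldl_cons]
      have hmid := phase2_mid c X hXc c (fun z hz => hz) h p hp
      have := ih hxs' (stepF c h X) _ hmid
      rw [List.foldl_cons] at *
      exact this

theorem A_result (c : List String) (d : List (String × String × Int)) :
    schulze_p c d
      = ((pairKeys c).map (fun k => (k, gFW c d k))).map (fun kv => (kv.1.1, kv.1.2, kv.2)) := by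
  have hA : schulze_p c d
      = ((c.foldl (fun p X =>
          c.foldl (fun p Z =>
            if X ≠ Z then
              c.foldl (fun p Y =>
                if X ≠ Y ∧ Z ≠ Y then
                  p.insert (Z, Y)
                    (max (p.getD (Z, Y) 0) (min (p.getD (Z, X) 0) (p.getD (X, Y) 0)))
                else p) p
            else p) p)
          (c.foldl (fun p X =>
            c.foldl (fun p Y => if X ≠ Y then p.insert (X, Y) (wvalF d (X, Y)) else p) p)
            PySem.Dict.empty)).items).map (fun kv => (kv.1.1, kv.1.2, kv.2)) := rfl
  rw [hA, phase2_items c c (fun x hx => hx) (wvalF d) _ (phase1_items c d)]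
  rfl

-- ---------- B-side simulation ----------

theorem altRound_items (c : List String) (d : List (String × String × Int))
    (w : PySem.Dict (String × String) Int)
    (hw : w.items = (pairKeys c).map (fun k => (k, wvalF d k)))
    (cd : List String) (hcd : cd = PySem.List.dedup c)
    (Z : String) (row : PySem.Dict String Int) (h : String → Int)
    (hrow : row.items = (cd.filter (fun Y => decide (Y ≠ Z))).map (fun Y => (Y, h Y))) :
    (altRound cd w Z row).items
      = (cd.filter (fun Y => decide (Y ≠ Z))).map (fun Y => (Y, jstepF cd d Z h Y)) := by
  have hndcd : cd.Nodup := by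
    rw [hcd, PySem.List.dedup_eq_ofList]; exact PySem.Set.nodup_ofList c
  have hYL : (cd.filter (fun Y => decide (Y ≠ Z))).Nodup := List.Nodup.filter _ hndcd
  have hndK : (pairKeys c).Nodup := nodup_pairKeysFrom c c
  unfold altRound
  rw [items_ofList_nodup _ (by simpa [List.map_map, Function.comp_def] using hYL)]
  refine List.map_congr_left (fun Y hY => ?_)
  obtain ⟨hYcd, hq⟩ := List.mem_filter.mp hY
  have hYZ : Y ≠ Z := of_decide_eq_true hq
  have hrowY : row.getD Y 0 = h Y := mapform_getD hrow hYL hY (0 : Int)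
  have hlist : (cd.filter (fun X => decide (X ≠ Z) && decide (X ≠ Y))).map
        (fun X => min (row.getD X 0) (w.getD (X, Y) 0))
      = (cd.filter (fun X => decide (X ≠ Z) && decide (X ≠ Y))).map
        (fun X => min (h X) (wvalF d (X, Y))) := by
    refine List.map_congr_left (fun X hX => ?_)
    obtain ⟨hXcd, hqX⟩ := List.mem_filter.mp hX
    have hXZ : X ≠ Z := of_decide_eq_true (Bool.and_elim_left hqX)
    have hXY : X ≠ Y := of_decide_eq_true (Bool.and_elim_right hqX)
    have hXmem : X ∈ cd.filter (fun Y => decide (Y ≠ Z)) :=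
      List.mem_filter.mpr ⟨hXcd, decide_eq_true hXZ⟩
    have hXc : X ∈ c := by
      rw [hcd, PySem.List.dedup_eq_ofList] at hXcd
      exact (PySem.Set.mem_ofList (y := X) (xs := c)).mp hXcd
    have hYc : Y ∈ c := by
      rw [hcd, PySem.List.dedup_eq_ofList] at hYcd
      exact (PySem.Set.mem_ofList (y := Y) (xs := c)).mp hYcd
    rw [mapform_getD hrow hYL hXmem (0 : Int),
      mapform_getD hw hndK (mem_pairKeysFrom.mpr ⟨hXc, hYc, hXY⟩) (0 : Int)]
  rw [hrowY, hlist]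
  rfl

theorem jiterF_succ_right (c : List String) (d : List (String × String × Int)) (Z : String)
    (n : Nat) (h : String → Int) :
    jiterF c d Z (n + 1) h = jstepF c d Z (jiterF c d Z n h) := by
  induction n generalizing h with
  | zero => rfl
  | succ n ih => exact ih (jstepF c d Z h)

theorem jstepF_congrOn (c : List String) (d : List (String × String × Int)) (Z : String)
    {h h' : String → Int} (hh : ∀ y ∈ c.filter (fun Y => decide (Y ≠ Z)), h y = h' y) :
    ∀ y ∈ c.filter (fun Y => decide (Y ≠ Z)), jstepF c d Z h y = jstepF c d Z h' y := by
  intro y hy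
  obtain ⟨hycd, hqy⟩ := List.mem_filter.mp hy
  unfold jstepF
  rw [hh y hy]
  have hlist : (c.filter (fun X => decide (X ≠ Z) && decide (X ≠ y))).map
        (fun X => min (h X) (wvalF d (X, y)))
      = (c.filter (fun X => decide (X ≠ Z) && decide (X ≠ y))).map
        (fun X => min (h' X) (wvalF d (X, y))) := by
    refine List.map_congr_left (fun X hX => ?_)
    obtain ⟨hXcd, hqX⟩ := List.mem_filter.mp hX
    have hXmem : X ∈ c.filter (fun Y => decide (Y ≠ Z)) :=
      List.mem_filter.mpr ⟨hXcd, Bool.and_elim_left hqX⟩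
    rw [hh X hXmem]
  rw [hlist]

theorem jiterF_congrOn (c : List String) (d : List (String × String × Int)) (Z : String)
    (n : Nat) {h h' : String → Int}
    (hh : ∀ y ∈ c.filter (fun Y => decide (Y ≠ Z)), h y = h' y) :
    ∀ y ∈ c.filter (fun Y => decide (Y ≠ Z)), jiterF c d Z n h y = jiterF c d Z n h' y := by
  induction n generalizing h h' with
  | zero => exact hh
  | succ n ih => exact ih (jstepF_congrOn c d Z hh)

theorem jiterF_stable (c : List String) (d : List (String × String × Int)) (Z : String)
    {h : String → Int}
    (hs : ∀ y ∈ c.filter (fun Y => decide (Y ≠ Z)), jstepF c d Z h y = h y) (n : Nat) :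
    ∀ y ∈ c.filter (fun Y => decide (Y ≠ Z)), jiterF c d Z n h y = h y := by
  induction n with
  | zero => exact fun y hy => rfl
  | succ n ih =>
      intro y hy
      have h1 : jiterF c d Z (n + 1) h y = jiterF c d Z n (jstepF c d Z h) y := rfl
      rw [h1, jiterF_congrOn c d Z n hs y hy, ih y hy]

theorem altLoop_items (c : List String) (d : List (String × String × Int))
    (w : PySem.Dict (String × String) Int)
    (hw : w.items = (pairKeys c).map (fun k => (k, wvalF d k)))
    (cd : List String) (hcd : cd = PySem.List.dedup c) (Z : String) :
    ∀ (n : Nat) (row : PySem.Dict String Int) (h : String → Int),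
    row.items = (cd.filter (fun Y => decide (Y ≠ Z))).map (fun Y => (Y, h Y)) →
    ∃ h' : String → Int,
      (altLoop cd w Z n row).items
          = (cd.filter (fun Y => decide (Y ≠ Z))).map (fun Y => (Y, h' Y))
      ∧ ∀ y ∈ cd.filter (fun Y => decide (Y ≠ Z)), h' y = jiterF cd d Z n h y := by
  intro n
  induction n with
  | zero => exact fun row h hrow => ⟨h, hrow, fun y hy => rfl⟩
  | succ n ih =>
      intro row h hrow
      have hnew := altRound_items c d w hw cd hcd Z row h hrow
      by_cases hstop : altRound cd w Z row = row
      · have heq : ∀ y ∈ cd.filter (fun Y => decide (Y ≠ Z)),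
            jstepF cd d Z h y = h y := by
          apply map_pair_inj
          rw [← hnew, hstop, hrow]
        refine ⟨h, ?_, ?_⟩
        · show (if altRound cd w Z row = row then row
              else altLoop cd w Z n (altRound cd w Z row)).items = _
          rw [if_pos hstop, hrow]
        · intro y hy
          have h2 := jiterF_congrOn cd d Z n heq y hy
          have h3 := jiterF_stable cd d Z heq n y hy
          exact ((h2.trans h3)).symm
      · obtain ⟨h', hit, hval⟩ := ih (altRound cd w Z row) (jstepF cd d Z h) hnew
        refine ⟨h', ?_, fun y hy => hval y hy⟩
        show (if altRound cd w Z row = row then row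
            else altLoop cd w Z n (altRound cd w Z row)).items = _
        rw [if_neg hstop]
        exact hit

theorem mem_dedup_mem {c : List String} {x : String} (hx : x ∈ PySem.List.dedup c) : x ∈ c := by
  rw [PySem.List.dedup_eq_ofList] at hx
  exact (PySem.Set.mem_ofList (y := x) (xs := c)).mp hx

theorem assemble_block (Z : String) (v : String → Int) :
    ∀ (ys : List String), ys.Nodup →
    ∀ (p : PySem.Dict (String × String) Int), (∀ q ∈ p.keys, q.1 ≠ Z) →
    (ys.foldl (fun p Y => if Y ≠ Z then p.insert (Z, Y) (v Y) else p) p).items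
      = p.items ++ (ys.filter (fun Y => decide (Y ≠ Z))).map (fun Y => ((Z, Y), v Y)) := by
  intro ys
  induction ys using List.reverseRecOn with
  | nil => intro _ p _; simp
  | append_singleton ys Y ih =>
      intro hnd p hp
      have hnd2 := List.nodup_append.mp hnd
      have hYys : Y ∉ ys := (List.nodup_cons.mp (List.nodup_append_comm.mp hnd)).1
      rw [List.foldl_append, List.foldl_cons, List.foldl_nil]
      by_cases hYZ : Y ≠ Z
      · have hmemk : (Z, Y) ∉
            (ys.foldl (fun p Y => if Y ≠ Z then p.insert (Z, Y) (v Y) else p) p).keys := by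
          simp only [PySem.Dict.keys, ih hnd2.1 p hp, List.map_append, List.mem_append,
            List.map_map]
          rintro (hc | hc)
          · exact hp _ hc rfl
          · rcases List.mem_map.mp hc with ⟨y, hy, hEq⟩
            have : y = Y := by simpa using congrArg Prod.snd hEq
            exact hYys (this ▸ (List.mem_filter.mp hy).1)
        have hcont : (ys.foldl (fun p Y => if Y ≠ Z then p.insert (Z, Y) (v Y) else p)
            p).contains (Z, Y) = false := by
          rw [← Bool.not_eq_true]
          intro hcc
          exact hmemk ((PySem.Dict.contains_iff_mem_keys _ _).mp hcc)
        rw [if_pos hYZ, PySem.Dict.items_insert_of_not_contains _ _ hcont, ih hnd2.1 p hp]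
        simp [hYZ, List.filter_append, List.append_assoc]
      · rw [if_neg hYZ, ih hnd2.1 p hp]
        simp [hYZ, List.filter_append]

theorem assemble_go (c : List String) (d : List (String × String × Int))
    (w : PySem.Dict (String × String) Int)
    (hw : w.items = (pairKeys c).map (fun k => (k, wvalF d k))) :
    ∀ (rest : List String), rest.Nodup → (∀ x ∈ rest, x ∈ PySem.List.dedup c) →
    ∀ (p : PySem.Dict (String × String) Int), (∀ q ∈ p.keys, q.1 ∉ rest) →
    (rest.foldl (fun p Z =>
        (PySem.List.dedup c).foldl (fun p Y =>
          if Y ≠ Z then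
            p.insert (Z, Y)
              ((altLoop (PySem.List.dedup c) w Z (PySem.List.dedup c).length
                (PySem.Dict.ofList (((PySem.List.dedup c).filter (fun Y => decide (Y ≠ Z))).map
                  (fun Y => (Y, w.getD (Z, Y) 0))))).getD Y 0)
          else p) p) p).items
      = p.items ++ rest.flatMap (fun Z =>
          ((PySem.List.dedup c).filter (fun Y => decide (Y ≠ Z))).map (fun Y =>
            ((Z, Y), jiterF (PySem.List.dedup c) d Z (PySem.List.dedup c).length
              (fun Y' => wvalF d (Z, Y')) Y))) := by
  intro rest
  induction rest with
  | nil => intro _ _ p _; simp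
  | cons Z rest ih =>
      intro hnd hsub p hp
      have hndcd : (PySem.List.dedup c).Nodup := by
        rw [PySem.List.dedup_eq_ofList]; exact PySem.Set.nodup_ofList c
      have hZcd : Z ∈ PySem.List.dedup c := hsub Z List.mem_cons_self
      have hZc : Z ∈ c := mem_dedup_mem hZcd
      have hndK : (pairKeys c).Nodup := nodup_pairKeysFrom c c
      have hYL : ((PySem.List.dedup c).filter (fun Y => decide (Y ≠ Z))).Nodup :=
        List.Nodup.filter _ hndcd
      -- the initial row of source Z
      have hrow0 : (PySem.Dict.ofList (((PySem.List.dedup c).filter (fun Y => decide (Y ≠ Z))).map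
            (fun Y => (Y, w.getD (Z, Y) 0)))).items
          = ((PySem.List.dedup c).filter (fun Y => decide (Y ≠ Z))).map
              (fun Y => (Y, (fun Y' => wvalF d (Z, Y')) Y)) := by
        rw [items_ofList_nodup _ (by simpa [List.map_map, Function.comp_def] using hYL)]
        refine List.map_congr_left (fun Y hY => ?_)
        obtain ⟨hYcd, hqY⟩ := List.mem_filter.mp hY
        have hYZ : Y ≠ Z := of_decide_eq_true hqY
        rw [mapform_getD hw hndK
          (mem_pairKeysFrom.mpr ⟨hZc, mem_dedup_mem hYcd, fun he => hYZ he.symm⟩) (0 : Int)]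
      obtain ⟨h', hit, hval⟩ := altLoop_items c d w hw (PySem.List.dedup c) rfl Z
        (PySem.List.dedup c).length _ _ hrow0
      have hblock := assemble_block Z
        (fun Y => (altLoop (PySem.List.dedup c) w Z (PySem.List.dedup c).length
          (PySem.Dict.ofList (((PySem.List.dedup c).filter (fun Y => decide (Y ≠ Z))).map
            (fun Y => (Y, w.getD (Z, Y) 0))))).getD Y 0)
        (PySem.List.dedup c) hndcd p (fun q hq => fun he => hp q hq (he ▸ List.mem_cons_self))
      rw [List.foldl_cons]
      have hkeys2 : ∀ q ∈ (((PySem.List.dedup c).foldl (fun p Y =>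
          if Y ≠ Z then
            p.insert (Z, Y)
              ((altLoop (PySem.List.dedup c) w Z (PySem.List.dedup c).length
                (PySem.Dict.ofList (((PySem.List.dedup c).filter (fun Y => decide (Y ≠ Z))).map
                  (fun Y => (Y, w.getD (Z, Y) 0))))).getD Y 0)
          else p) p)).keys, q.1 ∉ rest := by
        intro q hq
        simp only [PySem.Dict.keys, hblock, List.map_append, List.mem_append, List.map_map] at hq
        rcases hq with hq | hq
        · exact fun hc => hp q hq (List.mem_cons_of_mem _ hc)
        · rcases List.mem_map.mp hq with ⟨y, _, hEq⟩
          have : q.1 = Z := by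
            have := congrArg Prod.fst hEq; simpa using this.symm ▸ rfl
          rw [this]
          exact (List.nodup_cons.mp hnd).1
        
      have := ih (List.nodup_cons.mp hnd).2
        (fun x hx => hsub x (List.mem_cons_of_mem _ hx)) _ hkeys2
      rw [this, hblock, List.flatMap_cons, List.append_assoc]
      congr 2
      refine List.map_congr_left (fun Y hY => ?_)
      simp only [mapform_getD hit hYL hY (0 : Int), hval Y hY]

theorem B_result (c : List String) (d : List (String × String × Int)) :
    schulze_p_alt c d
      = ((pairKeys c).map (fun k =>
          (k, jiterF (PySem.List.dedup c) d k.1 (PySem.List.dedup c).length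
                (fun Y => wvalF d (k.1, Y)) k.2))).map
          (fun kv => (kv.1.1, kv.1.2, kv.2)) := by
  have hndcd : (PySem.List.dedup c).Nodup := by
    rw [PySem.List.dedup_eq_ofList]; exact PySem.Set.nodup_ofList c
  have hw : ((PySem.List.dedup c).foldl (fun p X =>
        (PySem.List.dedup c).foldl (fun p Y =>
          if X ≠ Y then p.insert (X, Y) (wvalF d (X, Y)) else p) p)
      PySem.Dict.empty).items = (pairKeys c).map (fun k => (k, wvalF d k)) := by
    rw [phase1_items (PySem.List.dedup c) d, pairKeys_dedup]
  have hB : schulze_p_alt c d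
      = (((PySem.List.dedup c).foldl (fun p Z =>
          (PySem.List.dedup c).foldl (fun p Y =>
            if Y ≠ Z then
              p.insert (Z, Y)
                ((altLoop (PySem.List.dedup c)
                  ((PySem.List.dedup c).foldl (fun p X =>
                    (PySem.List.dedup c).foldl (fun p Y =>
                      if X ≠ Y then p.insert (X, Y) (wvalF d (X, Y)) else p) p)
                    PySem.Dict.empty)
                  Z (PySem.List.dedup c).length
                  (PySem.Dict.ofList
                    (((PySem.List.dedup c).filter (fun Y => decide (Y ≠ Z))).map
                      (fun Y => (Y, ((PySem.List.dedup c).foldl (fun p X =>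
                        (PySem.List.dedup c).foldl (fun p Y =>
                          if X ≠ Y then p.insert (X, Y) (wvalF d (X, Y)) else p) p)
                        PySem.Dict.empty).getD (Z, Y) 0))))).getD Y 0)
            else p) p)
          PySem.Dict.empty).items).map (fun kv => (kv.1.1, kv.1.2, kv.2)) := rfl
  rw [hB, assemble_go c d _ hw (PySem.List.dedup c) hndcd (fun x hx => hx)
    PySem.Dict.empty (fun q hq => absurd (PySem.Dict.keys_empty ▸ hq) List.not_mem_nil)]
  have hflat : (PySem.List.dedup c).flatMap (fun Z =>
        ((PySem.List.dedup c).filter (fun Y => decide (Y ≠ Z))).map (fun Y =>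
          ((Z, Y), jiterF (PySem.List.dedup c) d Z (PySem.List.dedup c).length
            (fun Y' => wvalF d (Z, Y')) Y)))
      = (pairKeys c).map (fun k =>
          (k, jiterF (PySem.List.dedup c) d k.1 (PySem.List.dedup c).length
            (fun Y => wvalF d (k.1, Y)) k.2)) := by
    unfold pairKeys pairKeysFrom
    rw [List.map_flatMap, ← PySem.List.dedup_eq_ofList]
    refine List.flatMap_congr (fun X hX => ?_)
    rw [List.map_map,
      List.filter_congr (fun Y _ => show (decide (Y ≠ X)) = (decide (X ≠ Y)) from
        decide_eq_decide.mpr ne_comm)]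
    rfl
  rw [hflat]
  rfl

-- ---------- the mathematical core: both sides compute widest-path (bottleneck) values ----------

theorem wvF_append (d : List (String × String × Int)) (Z v Y : String) (vs1 vs2 : List String) :
    wvF d Z (vs1 ++ v :: vs2) Y = min (wvF d Z vs1 v) (wvF d v vs2 Y) := by
  induction vs1 generalizing Z with
  | nil => rfl
  | cons a vs1 ih =>
      show min (wvalF d (Z, a)) (wvF d a (vs1 ++ v :: vs2) Y) = _
      rw [ih a, ← min_assoc]
      rfl

theorem stepF_le (c : List String) (g : String × String → Int) (X : String) (k : String × String) :
    g k ≤ stepF c g X k := by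
  unfold stepF
  split_ifs
  · exact le_max_left _ _
  · exact le_refl _

theorem stepF_pos {c : List String} {g : String × String → Int} {X : String}
    {k : String × String} (h : k.1 ∈ c ∧ X ≠ k.1 ∧ k.2 ∈ c ∧ X ≠ k.2 ∧ k.1 ≠ k.2) :
    stepF c g X k = max (g k) (min (g (k.1, X)) (g (X, k.2))) := if_pos h

theorem stepF_neg {c : List String} {g : String × String → Int} {X : String}
    {k : String × String} (h : ¬(k.1 ∈ c ∧ X ≠ k.1 ∧ k.2 ∈ c ∧ X ≠ k.2 ∧ k.1 ≠ k.2)) :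
    stepF c g X k = g k := if_neg h

theorem foldl_stepF_le (c l : List String) (g : String × String → Int) (k : String × String) :
    g k ≤ (l.foldl (stepF c) g) k := by
  induction l generalizing g with
  | nil => exact le_refl _
  | cons X l ih => exact le_trans (stepF_le c g X k) (ih (stepF c g X))

-- after processing the intermediates l, A's table dominates every walk through l
theorem fw_ge_walk (c : List String) (d : List (String × String × Int)) (l : List String)
    (hl : ∀ x ∈ l, x ∈ c) :
    ∀ (vs : List String) (Z Y : String), Z ∈ c → Y ∈ c → Z ≠ Y →
    (∀ v ∈ vs, v ∈ l) → Z ∉ vs → Y ∉ vs →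
    wvF d Z vs Y ≤ (l.foldl (stepF c) (wvalF d)) (Z, Y) := by
  induction l using List.reverseRecOn with
  | nil =>
      intro vs Z Y hZ hY hZY hvl hZv hYv
      cases vs with
      | nil => exact le_refl _
      | cons v vs => cases hvl v List.mem_cons_self
  | append_singleton l x ihl =>
      have hlx : ∀ v ∈ l, v ∈ c := fun v hv => hl v (List.mem_append_left _ hv)
      have hxc : x ∈ c := hl x (List.mem_append_right _ List.mem_cons_self)
      have ihl' := ihl hlx
      have hG : ((l ++ [x]).foldl (stepF c) (wvalF d)) = stepF c (l.foldl (stepF c) (wvalF d)) x := by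
        rw [List.foldl_append, List.foldl_cons, List.foldl_nil]
      have aux : ∀ (n : Nat) (vs : List String) (Z Y : String), vs.length ≤ n →
          Z ∈ c → Y ∈ c → Z ≠ Y → (∀ v ∈ vs, v ∈ l ++ [x]) → Z ∉ vs → Y ∉ vs →
          wvF d Z vs Y ≤ ((l ++ [x]).foldl (stepF c) (wvalF d)) (Z, Y) := by
        intro n
        induction n with
        | zero =>
            intro vs Z Y hlen hZ hY hZY hvl hZv hYv
            have : vs = [] := List.eq_nil_of_length_eq_zero (Nat.le_zero.mp hlen)
            subst this
            exact foldl_stepF_le c (l ++ [x]) (wvalF d) (Z, Y)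
        | succ n ihn =>
            intro vs Z Y hlen hZ hY hZY hvl hZv hYv
            by_cases hx : x ∈ vs
            · obtain ⟨vs1, vs2, hvs, hx1⟩ := List.eq_append_cons_of_mem hx
              subst hvs
              by_cases hx2 : x ∈ vs2
              · obtain ⟨a, b, hab, _⟩ := List.eq_append_cons_of_mem hx2
                subst hab
                have hshort : wvF d Z (vs1 ++ x :: (a ++ x :: b)) Y
                    ≤ wvF d Z (vs1 ++ x :: b) Y := by
                  rw [wvF_append, wvF_append, wvF_append]
                  exact min_le_min (le_refl _) (min_le_right _ _)
                refine le_trans hshort (ihn (vs1 ++ x :: b) Z Y ?_ hZ hY hZY ?_ ?_ ?_)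
                · simp only [List.length_append, List.length_cons] at hlen ⊢; omega
                · intro v hv
                  rcases List.mem_append.mp hv with hv | hv
                  · exact hvl v (List.mem_append_left _ hv)
                  · rcases List.mem_cons.mp hv with rfl | hv
                    · exact hvl v (List.mem_append_right _ List.mem_cons_self)
                    · exact hvl v (List.mem_append_right _ (List.mem_cons_of_mem _
                        (List.mem_append_right _ (List.mem_cons_of_mem _ hv))))
                · intro hc
                  rcases List.mem_append.mp hc with hc | hc
                  · exact hZv (List.mem_append_left _ hc)
                  · rcases List.mem_cons.mp hc with rfl | hc
                    · exact hZv (List.mem_append_right _ List.mem_cons_self)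
                    · exact hZv (List.mem_append_right _ (List.mem_cons_of_mem _
                        (List.mem_append_right _ (List.mem_cons_of_mem _ hc))))
                · intro hc
                  rcases List.mem_append.mp hc with hc | hc
                  · exact hYv (List.mem_append_left _ hc)
                  · rcases List.mem_cons.mp hc with rfl | hc
                    · exact hYv (List.mem_append_right _ List.mem_cons_self)
                    · exact hYv (List.mem_append_right _ (List.mem_cons_of_mem _
                        (List.mem_append_right _ (List.mem_cons_of_mem _ hc))))
              · -- x occurs once: split the walk at x and use the l-induction hypothesis
                have hZx : Z ≠ x := fun he => hZv (he ▸ hx)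
                have hxY : x ≠ Y := fun he => hYv (he ▸ hx)
                have hm1 : ∀ v ∈ vs1, v ∈ l := by
                  intro v hv
                  have hvx : v ≠ x := fun he => hx1 (he ▸ hv)
                  rcases List.mem_append.mp (hvl v (List.mem_append_left _ hv)) with h | h
                  · exact h
                  · exact absurd (List.mem_singleton.mp h) hvx
                have hm2 : ∀ v ∈ vs2, v ∈ l := by
                  intro v hv
                  have hvx : v ≠ x := fun he => hx2 (he ▸ hv)
                  rcases List.mem_append.mp (hvl v (List.mem_append_right _
                    (List.mem_cons_of_mem _ hv))) with h | h
                  · exact h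
                  · exact absurd (List.mem_singleton.mp h) hvx
                have h1 : wvF d Z vs1 x ≤ (l.foldl (stepF c) (wvalF d)) (Z, x) :=
                  ihl' vs1 Z x hZ hxc hZx hm1
                    (fun hc => hZv (List.mem_append_left _ hc)) hx1
                have h2 : wvF d x vs2 Y ≤ (l.foldl (stepF c) (wvalF d)) (x, Y) :=
                  ihl' vs2 x Y hxc hY hxY hm2 hx2
                    (fun hc => hYv (List.mem_append_right _ (List.mem_cons_of_mem _ hc)))
                rw [wvF_append, hG,
                  stepF_pos ⟨hZ, fun he => hZx he.symm, hY, hxY, hZY⟩]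
                exact le_trans (min_le_min h1 h2) (le_max_right _ _)
            · -- the walk avoids x entirely
              have hm : ∀ v ∈ vs, v ∈ l := by
                intro v hv
                have hvx : v ≠ x := fun he => hx (he ▸ hv)
                rcases List.mem_append.mp (hvl v hv) with h | h
                · exact h
                · exact absurd (List.mem_singleton.mp h) hvx
              rw [hG]
              exact le_trans (ihl' vs Z Y hZ hY hZY hm hZv hYv)
                (stepF_le c (l.foldl (stepF c) (wvalF d)) x (Z, Y))
      intro vs Z Y
      exact aux vs.length vs Z Y (le_refl _)

-- every table entry of A is dominated by some walk through l
theorem fw_le_walk (c : List String) (d : List (String × String × Int)) (l : List String) :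
    ∀ Z Y : String, ∃ vs : List String, (∀ v ∈ vs, v ∈ l) ∧
      (l.foldl (stepF c) (wvalF d)) (Z, Y) ≤ wvF d Z vs Y := by
  induction l using List.reverseRecOn with
  | nil => exact fun Z Y => ⟨[], by simp, le_refl _⟩
  | append_singleton l x ih =>
      intro Z Y
      have hG : ((l ++ [x]).foldl (stepF c) (wvalF d)) = stepF c (l.foldl (stepF c) (wvalF d)) x := by
        rw [List.foldl_append, List.foldl_cons, List.foldl_nil]
      rw [hG]
      by_cases hcond : ((Z, Y) : String × String).1 ∈ c ∧ x ≠ (Z, Y).1 ∧ (Z, Y).2 ∈ c ∧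
          x ≠ (Z, Y).2 ∧ (Z, Y).1 ≠ (Z, Y).2
      · rw [stepF_pos hcond]
        obtain ⟨vs0, hm0, hle0⟩ := ih Z Y
        obtain ⟨vs1, hm1, hle1⟩ := ih Z x
        obtain ⟨vs2, hm2, hle2⟩ := ih x Y
        rcases le_total (min ((l.foldl (stepF c) (wvalF d)) (Z, x))
            ((l.foldl (stepF c) (wvalF d)) (x, Y))) ((l.foldl (stepF c) (wvalF d)) (Z, Y)) with
          hmx | hmx
        · exact ⟨vs0, fun v hv => List.mem_append_left _ (hm0 v hv),
            by rw [max_eq_left hmx]; exact hle0⟩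
        · refine ⟨vs1 ++ x :: vs2, ?_, ?_⟩
          · intro v hv
            rcases List.mem_append.mp hv with hv | hv
            · exact List.mem_append_left _ (hm1 v hv)
            · rcases List.mem_cons.mp hv with rfl | hv
              · exact List.mem_append_right _ List.mem_cons_self
              · exact List.mem_append_left _ (hm2 v hv)
          · rw [max_eq_right hmx, wvF_append]
            exact min_le_min hle1 hle2
      · rw [stepF_neg hcond]
        obtain ⟨vs0, hm0, hle0⟩ := ih Z Y
        exact ⟨vs0, fun v hv => List.mem_append_left _ (hm0 v hv), hle0⟩

-- every walk is dominated by a duplicate-free walk avoiding both endpoints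
theorem walk_normalize (d : List (String × String × Int)) :
    ∀ (vs : List String) (Z Y : String), ∃ vs' : List String, vs'.Nodup ∧
      (∀ v ∈ vs', v ∈ vs) ∧ Z ∉ vs' ∧ Y ∉ vs' ∧ wvF d Z vs Y ≤ wvF d Z vs' Y := by
  have aux : ∀ (n : Nat) (vs : List String) (Z Y : String), vs.length ≤ n →
      ∃ vs' : List String, vs'.Nodup ∧ (∀ v ∈ vs', v ∈ vs) ∧ Z ∉ vs' ∧ Y ∉ vs' ∧
        wvF d Z vs Y ≤ wvF d Z vs' Y := by
    intro n
    induction n with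
    | zero =>
        intro vs Z Y hlen
        have : vs = [] := List.eq_nil_of_length_eq_zero (Nat.le_zero.mp hlen)
        subst this
        exact ⟨[], List.nodup_nil, by simp, List.not_mem_nil, List.not_mem_nil, le_refl _⟩
    | succ n ihn =>
        intro vs Z Y hlen
        by_cases hZ : Z ∈ vs
        · obtain ⟨s, t, hst, _⟩ := List.eq_append_cons_of_mem hZ
          subst hst
          obtain ⟨vs', h1, h2, h3, h4, h5⟩ := ihn t Z Y (by
            simp only [List.length_append, List.length_cons] at hlen ⊢; omega)
          refine ⟨vs', h1, ?_, h3, h4, ?_⟩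
          · exact fun v hv =>
              List.mem_append_right _ (List.mem_cons_of_mem _ (h2 v hv))
          · rw [wvF_append]
            exact le_trans (min_le_right _ _) h5
        · by_cases hY : Y ∈ vs
          · obtain ⟨s, t, hst, _⟩ := List.eq_append_cons_of_mem hY
            subst hst
            obtain ⟨vs', h1, h2, h3, h4, h5⟩ := ihn s Z Y (by
              simp only [List.length_append, List.length_cons] at hlen ⊢; omega)
            refine ⟨vs', h1, fun v hv => List.mem_append_left _ (h2 v hv), h3, h4, ?_⟩
            rw [wvF_append]
            exact le_trans (min_le_left _ _) h5
          · cases vs with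
            | nil =>
                exact ⟨[], List.nodup_nil, by simp, List.not_mem_nil, List.not_mem_nil,
                  le_refl _⟩
            | cons v rest =>
                by_cases hv : v ∈ rest
                · obtain ⟨a, b, hab, _⟩ := List.eq_append_cons_of_mem hv
                  subst hab
                  obtain ⟨vs', h1, h2, h3, h4, h5⟩ := ihn (v :: b) Z Y (by
                    simp only [List.length_cons, List.length_append] at hlen ⊢; omega)
                  refine ⟨vs', h1, ?_, h3, h4, ?_⟩
                  · intro u hu
                    rcases List.mem_cons.mp (h2 u hu) with rfl | hu'
                    · exact List.mem_cons_self
                    · exact List.mem_cons_of_mem _ (List.mem_append_right _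
                        (List.mem_cons_of_mem _ hu'))
                  · refine le_trans ?_ h5
                    show min (wvalF d (Z, v)) (wvF d v (a ++ v :: b) Y)
                      ≤ min (wvalF d (Z, v)) (wvF d v b Y)
                    rw [wvF_append]
                    exact min_le_min (le_refl _) (min_le_right _ _)
                · obtain ⟨rest', h1, h2, h3, h4, h5⟩ := ihn rest v Y (by
                    simp only [List.length_cons] at hlen; omega)
                  have hZv : Z ≠ v := fun he => hZ (he ▸ List.mem_cons_self)
                  have hYv : Y ≠ v := fun he => hY (he ▸ List.mem_cons_self)
                  refine ⟨v :: rest', List.nodup_cons.mpr ⟨h3, h1⟩, ?_, ?_, ?_, ?_⟩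
                  · intro u hu
                    rcases List.mem_cons.mp hu with rfl | hu'
                    · exact List.mem_cons_self
                    · exact List.mem_cons_of_mem _ (h2 u hu')
                  · intro hc
                    rcases List.mem_cons.mp hc with he | hc'
                    · exact hZv he
                    · exact hZ (List.mem_cons_of_mem _ (h2 _ hc'))
                  · intro hc
                    rcases List.mem_cons.mp hc with he | hc'
                    · exact hYv he
                    · exact hY (List.mem_cons_of_mem _ (h2 _ hc'))
                  · exact min_le_min (le_refl _) h5
  intro vs Z Y
  exact aux vs.length vs Z Y (le_refl _)

theorem le_maxD_of_mem {x : Int} {l : List Int} (hx : x ∈ l) (dflt : Int) :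
    x ≤ PySem.List.maxD l (fun v => v) dflt := by
  unfold PySem.List.maxD
  cases h : PySem.List.max? l (fun v => v) with
  | none =>
      rw [(PySem.List.max?_eq_none_iff l _).mp h] at hx
      cases hx
  | some m => simpa using PySem.List.max?_isMax h x hx

theorem maxD_cases (l : List Int) (dflt : Int) :
    PySem.List.maxD l (fun v => v) dflt = dflt ∨ PySem.List.maxD l (fun v => v) dflt ∈ l := by
  unfold PySem.List.maxD
  cases h : PySem.List.max? l (fun v => v) with
  | none => left; rfl
  | some m => right; simpa using PySem.List.max?_mem h

theorem le_jiterF (c : List String) (d : List (String × String × Int)) (Z : String)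
    (n : Nat) (h : String → Int) (Y : String) : h Y ≤ jiterF c d Z n h Y := by
  induction n generalizing h with
  | zero => exact le_refl _
  | succ n ih =>
      exact le_trans (le_max_left _ _ : h Y ≤ jstepF c d Z h Y) (ih (jstepF c d Z h))

-- after k rounds, B's row dominates every duplicate-free walk of length at most k
theorem bf_ge_walk (cd : List String) (d : List (String × String × Int)) (Z : String) :
    ∀ (k : Nat) (vs : List String) (Y : String), Y ∈ cd → Y ≠ Z →
    vs.Nodup → (∀ v ∈ vs, v ∈ cd) → Z ∉ vs → Y ∉ vs → vs.length ≤ k →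
    wvF d Z vs Y ≤ jiterF cd d Z k (fun Y' => wvalF d (Z, Y')) Y := by
  intro k
  induction k with
  | zero =>
      intro vs Y hY hYZ hnd hm hZv hYv hlen
      have : vs = [] := List.eq_nil_of_length_eq_zero (Nat.le_zero.mp hlen)
      subst this
      exact le_refl _
  | succ k ih =>
      intro vs Y hY hYZ hnd hm hZv hYv hlen
      rcases List.eq_nil_or_concat vs with rfl | ⟨vs0, X, hvs⟩
      · exact le_jiterF cd d Z (k + 1) _ Y
      · rw [List.concat_eq_append] at hvs
        subst hvs
        rw [jiterF_succ_right]
        have hXvs : X ∈ vs0 ++ [X] := List.mem_append_right _ List.mem_cons_self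
        have hXcd : X ∈ cd := hm X hXvs
        have hXZ : X ≠ Z := fun he => hZv (he ▸ hXvs)
        have hXY : X ≠ Y := fun he => hYv (he ▸ hXvs)
        have hnd2 := List.nodup_append.mp hnd
        have hXvs0 : X ∉ vs0 := (List.nodup_cons.mp (List.nodup_append_comm.mp hnd)).1
        have h1 : wvF d Z vs0 X ≤ jiterF cd d Z k (fun Y' => wvalF d (Z, Y')) X :=
          ih vs0 X hXcd hXZ hnd2.1 (fun v hv => hm v (List.mem_append_left _ hv))
            (fun hc => hZv (List.mem_append_left _ hc)) hXvs0
            (by simp only [List.length_append, List.length_cons] at hlen ⊢; omega)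
        have hterm : min (jiterF cd d Z k (fun Y' => wvalF d (Z, Y')) X) (wvalF d (X, Y))
            ∈ (cd.filter (fun X => decide (X ≠ Z) && decide (X ≠ Y))).map
              (fun X => min (jiterF cd d Z k (fun Y' => wvalF d (Z, Y')) X) (wvalF d (X, Y))) :=
          List.mem_map.mpr ⟨X, List.mem_filter.mpr ⟨hXcd, by
            rw [decide_eq_true hXZ, decide_eq_true hXY]; rfl⟩, rfl⟩
        have hsplit : wvF d Z (vs0 ++ [X]) Y = min (wvF d Z vs0 X) (wvalF d (X, Y)) :=
          wvF_append d Z X Y vs0 []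
        rw [hsplit]
        refine le_trans (min_le_min h1 (le_refl _)) (le_trans (le_maxD_of_mem hterm _)
          (le_max_right _ _))

-- every row entry of B is dominated by some walk
theorem bf_le_walk (cd : List String) (d : List (String × String × Int)) (Z : String) :
    ∀ (k : Nat) (Y : String), ∃ vs : List String, (∀ v ∈ vs, v ∈ cd) ∧
      jiterF cd d Z k (fun Y' => wvalF d (Z, Y')) Y ≤ wvF d Z vs Y := by
  intro k
  induction k with
  | zero => exact fun Y => ⟨[], by simp, le_refl _⟩
  | succ k ih =>
      intro Y
      rw [jiterF_succ_right]
      rcases maxD_cases ((cd.filter (fun X => decide (X ≠ Z) && decide (X ≠ Y))).map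
          (fun X => min (jiterF cd d Z k (fun Y' => wvalF d (Z, Y')) X) (wvalF d (X, Y))))
          (jiterF cd d Z k (fun Y' => wvalF d (Z, Y')) Y) with hD | hD
      · obtain ⟨vs, hmv, hle⟩ := ih Y
        refine ⟨vs, hmv, ?_⟩
        show max _ _ ≤ _
        rw [hD, max_self]
        exact hle
      · rcases List.mem_map.mp hD with ⟨X, hXf, hEq⟩
        obtain ⟨hXcd, _⟩ := List.mem_filter.mp hXf
        obtain ⟨vsY, hmY, hleY⟩ := ih Y
        obtain ⟨vsX, hmX, hleX⟩ := ih X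
        rcases le_total (PySem.List.maxD ((cd.filter (fun X => decide (X ≠ Z) &&
            decide (X ≠ Y))).map (fun X => min (jiterF cd d Z k
              (fun Y' => wvalF d (Z, Y')) X) (wvalF d (X, Y))))
            (fun v => v)
            (jiterF cd d Z k (fun Y' => wvalF d (Z, Y')) Y))
            (jiterF cd d Z k (fun Y' => wvalF d (Z, Y')) Y) with hmx | hmx
        · refine ⟨vsY, hmY, ?_⟩
          show max _ _ ≤ _
          rw [max_eq_left hmx]
          exact hleY
        · refine ⟨vsX ++ [X], ?_, ?_⟩
          · intro v hv
            rcases List.mem_append.mp hv with hv | hv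
            · exact hmX v hv
            · rw [List.mem_singleton.mp hv]
              exact hXcd
          · show max _ _ ≤ _
            rw [max_eq_right hmx, ← hEq, wvF_append d Z X Y vsX []]
            exact min_le_min hleX (le_refl _)

theorem core_eq (c : List String) (d : List (String × String × Int))
    (Z Y : String) (hZ : Z ∈ c) (hY : Y ∈ c) (hZY : Z ≠ Y) :
    gFW c d (Z, Y)
      = jiterF (PySem.List.dedup c) d Z (PySem.List.dedup c).length
          (fun Y' => wvalF d (Z, Y')) Y := by
  have hmemcd : ∀ v : String, v ∈ PySem.List.dedup c ↔ v ∈ c := by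
    intro v
    rw [PySem.List.dedup_eq_ofList]
    constructor
    · exact fun hv => (PySem.Set.mem_ofList (y := v) (xs := c)).mp hv
    · exact fun hv => (PySem.Set.mem_ofList (y := v) (xs := c)).mpr hv
  have hndcd : (PySem.List.dedup c).Nodup := by
    rw [PySem.List.dedup_eq_ofList]; exact PySem.Set.nodup_ofList c
  apply le_antisymm
  · obtain ⟨vs, hmv, hle⟩ := fw_le_walk c d c Z Y
    obtain ⟨vs', hnd', hsub', hZ', hY', hle'⟩ := walk_normalize d vs Z Y
    have hmcd : ∀ v ∈ vs', v ∈ PySem.List.dedup c :=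
      fun v hv => (hmemcd v).mpr (hmv v (hsub' v hv))
    have hlen : vs'.length ≤ (PySem.List.dedup c).length := by
      calc vs'.length = vs'.toFinset.card := (List.toFinset_card_of_nodup hnd').symm
      _ ≤ (PySem.List.dedup c).toFinset.card := Finset.card_le_card (fun x hx => by
          simp only [List.mem_toFinset] at *
          exact hmcd x hx)
      _ ≤ (PySem.List.dedup c).length := (PySem.List.dedup c).toFinset_card_le
    exact le_trans (le_trans hle hle')
      (bf_ge_walk (PySem.List.dedup c) d Z (PySem.List.dedup c).length vs' Y
        ((hmemcd Y).mpr hY) (fun he => hZY he.symm) hnd' hmcd hZ' hY' hlen)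
  · obtain ⟨vs, hmv, hle⟩ := bf_le_walk (PySem.List.dedup c) d Z (PySem.List.dedup c).length Y
    obtain ⟨vs', hnd', hsub', hZ', hY', hle'⟩ := walk_normalize d vs Z Y
    exact le_trans (le_trans hle hle')
      (fw_ge_walk c d c (fun x hx => hx) vs' Z Y hZ hY hZY
        (fun v hv => (hmemcd v).mp (hmv v (hsub' v hv))) hZ' hY')

-- ===== VERDICT (by name: the statement is the Claim_ definition above) =====
theorem schulze_p_spec : Claim_equal_schulze_p := by
  intro candidates d _
  show schulze_p candidates d = schulze_p_alt candidates d
  rw [A_result, B_result]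
  refine congrArg _ (List.map_congr_left (fun k hk => ?_))
  obtain ⟨k1, k2⟩ := k
  obtain ⟨h1, h2, h3⟩ := mem_pairKeysFrom.mp hk
  exact congrArg (fun v => ((k1, k2), v)) (core_eq candidates d k1 k2 h1 h2 h3)
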